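-- pv_equiv track=rewrite | github.com/hydah/theking | scripts/validation.py | _handoff_target_sections_have_any_content
-- ===== SOURCE A (Python) =====
-- HANDOFF_TARGET_SECTIONS: tuple[str, ...] = (
--     "Viewed code/tests/docs",
--     "Impact surface",
-- )
--
-- def _handoff_target_sections_have_any_content(content: str) -> bool:
--     """Return True iff at least one target section has a non-empty child bullet.
--
--     Used to distinguish "unpopulated scaffold" (both sections present but no
--     child content yet — silent pass) from "partially filled but no file:line
--     anchor" (at least one child bullet exists, but none match \\S+:\\d+ — must
--     be rejected).
--
--     Mirrors the parsing in _handoff_has_anchor_under_target_section but only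
--     tracks whether any child bullet text survives under a target section.
--     """
--
--     def leading_ws(line: str) -> int:
--         return len(line) - len(line.lstrip(" "))
--
--     in_target = False
--     target_indent = -1
--     for raw_line in content.splitlines():
--         stripped = raw_line.strip()
--         if stripped.startswith("#"):
--             in_target = False
--             target_indent = -1
--             continue
--         if not stripped:
--             continue
--         indent = leading_ws(raw_line)
--         if stripped.startswith("- "):
--             bullet_body = stripped[2:].rstrip()
--             matched_target = None
--             for name in HANDOFF_TARGET_SECTIONS:
--                 if bullet_body == f"{name}:" or bullet_body.startswith(f"{name}:"):
--                     matched_target = name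
--                     break
--             if matched_target is not None:
--                 trailing_after_colon = bullet_body[len(matched_target) + 1 :].strip()
--                 if trailing_after_colon:
--                     return True
--                 in_target = True
--                 target_indent = indent
--                 continue
--             if in_target and indent <= target_indent:
--                 in_target = False
--                 target_indent = -1
--                 # Fall through: this bullet belongs to a non-target sibling,
--                 # not to a target section.
--                 continue
--         if in_target and indent > target_indent:
--             # Any non-empty child line (bullet or prose) counts as "content".
--             return True
--     return False
-- ===== SOURCE B (Python) =====
-- HANDOFF_TARGET_SECTIONS: tuple[str, ...] = (
--     "Viewed code/tests/docs",
--     "Impact surface",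
-- )
--
--
-- def _match_target(body: str):
--     for name in HANDOFF_TARGET_SECTIONS:
--         if body.startswith(name + ":"):
--             return name
--     return None
--
--
-- def _handoff_target_sections_have_any_content(content: str) -> bool:
--     lines = content.splitlines()
--     for i, raw in enumerate(lines):
--         stripped = raw.strip()
--         if not stripped.startswith("- "):
--             continue
--         body = stripped[2:].rstrip()
--         name = _match_target(body)
--         if name is None:
--             continue
--         if body[len(name) + 1:].strip():
--             return True
--         header_indent = len(raw) - len(raw.lstrip(" "))
--         for later in lines[i + 1:]:
--             s = later.strip()
--             if not s:
--                 continue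
--             if s.startswith("#"):
--                 break
--             indent = len(later) - len(later.lstrip(" "))
--             if s.startswith("- "):
--                 if _match_target(s[2:].rstrip()) is not None:
--                     break
--                 if indent <= header_indent:
--                     break
--                 return True
--             if indent > header_indent:
--                 return True
--     return False
-- ===== Notes on version B (the rewrite author's own statement) =====
-- stated objective: alternative
-- what changed: A's single stateful pass carrying in_target/target_indent across all lines is replaced by a per-header decomposition: for each target-section header bullet, a forward scan over the following lines looks for child content, stopping at a comment, another target header, or a dedented sibling bullet.
import Mathlib
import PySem

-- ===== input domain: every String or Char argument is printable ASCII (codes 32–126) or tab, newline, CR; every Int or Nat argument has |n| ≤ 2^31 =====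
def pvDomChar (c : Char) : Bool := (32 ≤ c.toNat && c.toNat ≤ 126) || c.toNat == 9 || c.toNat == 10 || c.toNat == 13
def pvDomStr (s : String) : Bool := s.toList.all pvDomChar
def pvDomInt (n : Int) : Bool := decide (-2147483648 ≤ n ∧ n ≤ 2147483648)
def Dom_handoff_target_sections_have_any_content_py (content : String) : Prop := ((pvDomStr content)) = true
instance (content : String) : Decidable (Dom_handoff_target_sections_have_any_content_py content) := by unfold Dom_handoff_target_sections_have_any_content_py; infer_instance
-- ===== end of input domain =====

-- B replaces A's single stateful pass (in_target/target_indent carried across lines) by a per-header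
-- forward scan: for each target header found, scan the following lines for child content (objective: simpler decomposition).

-- ===== PORT A =====
def pvTargets : List String := ["Viewed code/tests/docs", "Impact surface"]

-- exact port of `line.lstrip(" ")` (drop leading chars from the set {' '})
def pvLstripSpace (s : String) : String := String.ofList (s.toList.dropWhile (fun c => c == ' '))

-- leading_ws(line) = len(line) - len(line.lstrip(" "))
def pvLeadingWs (line : String) : Int := PySem.Str.len line - PySem.Str.len (pvLstripSpace line)

-- stripped[2:].rstrip(), the bullet body of a "- " line (used by both Pythons)
def pvBody (s : String) : String := PySem.Str.rstrip (PySem.Str.slice s (some 2) none)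

-- bullet_body[len(name) + 1:].strip(), the text after the matched "<name>:" (used by both Pythons)
def pvTrailing (name body : String) : String :=
  PySem.Str.strip (PySem.Str.slice body (some (PySem.Str.len name + 1)) none)

-- A's inner `for name in HANDOFF_TARGET_SECTIONS: if body == name+":" or body.startswith(name+":"): break`
def pvMatchA : List String → String → Option String
  | [], _ => none
  | n :: rest, body =>
    if body == (n ++ ":") || PySem.Str.startswith body (n ++ ":") then some n
    else pvMatchA rest body

def pvLoopA : List String → Bool → Int → Bool
  | [], _, _ => false
  | l :: ls, inT, tI =>
    let s := PySem.Str.strip l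
    if PySem.Str.startswith s "#" then pvLoopA ls false (-1)
    else if s == "" then pvLoopA ls inT tI
    else
      let indent := pvLeadingWs l
      if PySem.Str.startswith s "- " then
        match pvMatchA pvTargets (pvBody s) with
        | some name =>
          if pvTrailing name (pvBody s) != "" then true else pvLoopA ls true indent
        | none =>
          if inT && decide (indent ≤ tI) then pvLoopA ls false (-1)
          else if inT && decide (tI < indent) then true
          else pvLoopA ls inT tI
      else
        if inT && decide (tI < indent) then true else pvLoopA ls inT tI

def handoff_target_sections_have_any_content_py (content : String) : Bool :=
  pvLoopA (PySem.Str.splitlines content) false (-1)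

-- ===== PORT B =====
-- B's `_match_target(body)` helper
def pvMatchB : List String → String → Option String
  | [], _ => none
  | n :: rest, body =>
    if PySem.Str.startswith body (n ++ ":") then some n else pvMatchB rest body

-- B's inner `for later in lines[i+1:]` forward scan under a header of indent t
def pvScan : List String → Int → Bool
  | [], _ => false
  | l :: ls, t =>
    let s := PySem.Str.strip l
    if s == "" then pvScan ls t
    else if PySem.Str.startswith s "#" then false
    else
      let indent := pvLeadingWs l
      if PySem.Str.startswith s "- " then
        if (pvMatchB pvTargets (pvBody s)).isSome then false
        else if decide (indent ≤ t) then false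
        else true
      else if decide (t < indent) then true else pvScan ls t

-- B's outer loop over the lines
def pvLoopB : List String → Bool
  | [] => false
  | l :: ls =>
    let s := PySem.Str.strip l
    if PySem.Str.startswith s "- " then
      match pvMatchB pvTargets (pvBody s) with
      | some name =>
        if pvTrailing name (pvBody s) != "" then true
        else if pvScan ls (pvLeadingWs l) then true else pvLoopB ls
      | none => pvLoopB ls
    else pvLoopB ls

def handoff_target_sections_have_any_content_py_alt (content : String) : Bool :=
  pvLoopB (PySem.Str.splitlines content)

-- ===== PRECONDITION & SPEC =====
def Spec_handoff_target_sections_have_any_content_py (content : String) (out : Bool) : Prop := out = handoff_target_sections_have_any_content_py_alt content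
instance (content : String) (out : Bool) : Decidable (Spec_handoff_target_sections_have_any_content_py content out) := by unfold Spec_handoff_target_sections_have_any_content_py; infer_instance

-- ===== CLAIM (what is proved, stated in full; the proofs are below) =====
def Claim_equal_handoff_target_sections_have_any_content_py : Prop := ∀ (content : String), Dom_handoff_target_sections_have_any_content_py content → Spec_handoff_target_sections_have_any_content_py content (handoff_target_sections_have_any_content_py content)

-- ===== LEMMAS AND PROOFS =====

-- hand-proved unfolding lemmas (rfl) for the recursive loops
set_option maxHeartbeats 8000000 in
lemma pvLoopA_nil (inT : Bool) (tI : Int) : pvLoopA [] inT tI = false := rfl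

set_option maxHeartbeats 8000000 in
lemma pvLoopA_cons (l : String) (ls : List String) (inT : Bool) (tI : Int) :
    pvLoopA (l :: ls) inT tI =
      (let s := PySem.Str.strip l
       if PySem.Str.startswith s "#" then pvLoopA ls false (-1)
       else if s == "" then pvLoopA ls inT tI
       else
         let indent := pvLeadingWs l
         if PySem.Str.startswith s "- " then
           match pvMatchA pvTargets (pvBody s) with
           | some name =>
             if pvTrailing name (pvBody s) != "" then true else pvLoopA ls true indent
           | none =>
             if inT && decide (indent ≤ tI) then pvLoopA ls false (-1)
             else if inT && decide (tI < indent) then true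
             else pvLoopA ls inT tI
         else
           if inT && decide (tI < indent) then true else pvLoopA ls inT tI) := rfl

set_option maxHeartbeats 8000000 in
lemma pvScan_nil (t : Int) : pvScan [] t = false := rfl

set_option maxHeartbeats 8000000 in
lemma pvScan_cons (l : String) (ls : List String) (t : Int) :
    pvScan (l :: ls) t =
      (let s := PySem.Str.strip l
       if s == "" then pvScan ls t
       else if PySem.Str.startswith s "#" then false
       else
         let indent := pvLeadingWs l
         if PySem.Str.startswith s "- " then
           if (pvMatchB pvTargets (pvBody s)).isSome then false
           else if decide (indent ≤ t) then false
           else true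
         else if decide (t < indent) then true else pvScan ls t) := rfl

set_option maxHeartbeats 8000000 in
lemma pvLoopB_nil : pvLoopB [] = false := rfl

set_option maxHeartbeats 8000000 in
lemma pvLoopB_cons (l : String) (ls : List String) :
    pvLoopB (l :: ls) =
      (let s := PySem.Str.strip l
       if PySem.Str.startswith s "- " then
         match pvMatchB pvTargets (pvBody s) with
         | some name =>
           if pvTrailing name (pvBody s) != "" then true
           else if pvScan ls (pvLeadingWs l) then true else pvLoopB ls
         | none => pvLoopB ls
       else pvLoopB ls) := rfl

set_option maxHeartbeats 8000000 in
lemma pvMatchA_nil (body : String) : pvMatchA [] body = none := rfl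

set_option maxHeartbeats 8000000 in
lemma pvMatchA_cons (n : String) (rest : List String) (body : String) :
    pvMatchA (n :: rest) body =
      (if body == (n ++ ":") || PySem.Str.startswith body (n ++ ":") then some n
       else pvMatchA rest body) := rfl

set_option maxHeartbeats 8000000 in
lemma pvMatchB_nil (body : String) : pvMatchB [] body = none := rfl

set_option maxHeartbeats 8000000 in
lemma pvMatchB_cons (n : String) (rest : List String) (body : String) :
    pvMatchB (n :: rest) body =
      (if PySem.Str.startswith body (n ++ ":") then some n else pvMatchB rest body) := rfl

lemma pvStartswith_refl (s : String) : PySem.Str.startswith s s = true := by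
  simp [PySem.Str.startswith, PySem.Chars.startswith]

lemma pvHashNotDash (s : String) (h : PySem.Str.startswith s "#" = true) :
    PySem.Str.startswith s "- " = false := by
  simp [PySem.Str.startswith, PySem.Chars.startswith] at *
  obtain ⟨t, ht⟩ := h
  rw [← ht]
  simp [List.isPrefixOf]

lemma pvCharsEmptyDash : PySem.Chars.startswith [] ['-', ' '] = false := by decide

lemma pvCharsEmptyHash : PySem.Chars.startswith [] ['#'] = false := by decide

-- A's redundant equality test folds into startswith
lemma pvMatch_eq (ts : List String) (body : String) : pvMatchA ts body = pvMatchB ts body := by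
  induction ts with
  | nil => rw [pvMatchA_nil, pvMatchB_nil]
  | cons n rest ih =>
    rw [pvMatchA_cons, pvMatchB_cons]
    by_cases h : PySem.Str.startswith body (n ++ ":") = true
    · have h' := h
      simp at h'
      simp [h']
    · have hne : body ≠ n ++ ":" := fun hq => h (by rw [hq]; exact pvStartswith_refl _)
      have h' := h
      simp at h'
      simp [h', hne, ih]

-- the core invariant: A's loop from the inactive state is B's outer loop, and
-- from the active state (inside a target section of indent t) it is the forward
-- scan from t or-ed with B's outer loop on the remaining lines
set_option maxHeartbeats 8000000 in
lemma pvLoop_key (ls : List String) :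
    (∀ tI : Int, pvLoopA ls false tI = pvLoopB ls) ∧
    (∀ t : Int, pvLoopA ls true t = (pvScan ls t || pvLoopB ls)) := by
  induction ls with
  | nil => exact ⟨fun _ => by rw [pvLoopA_nil, pvLoopB_nil], fun _ => by rw [pvLoopA_nil, pvScan_nil, pvLoopB_nil]; rfl⟩
  | cons l rest ih =>
    obtain ⟨ih0, ih1⟩ := ih
    constructor
    · intro tI
      rw [pvLoopA_cons, pvLoopB_cons]
      simp only [Bool.false_and]
      by_cases hc : PySem.Str.startswith (PySem.Str.strip l) "#" = true
      · have hb := pvHashNotDash _ hc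
        have hc' := hc; have hb' := hb
        simp at hc' hb'
        simp [hc', hb', ih0]
      · have hc' := hc; simp at hc'
        by_cases he : PySem.Str.strip l = ""
        · simp [he, pvCharsEmptyDash, ih0]
        · by_cases hb : PySem.Str.startswith (PySem.Str.strip l) "- " = true
          · have hb' := hb; simp at hb'
            rcases hm : pvMatchB pvTargets (pvBody (PySem.Str.strip l)) with _ | name
            · simp [hc', he, hb', pvMatch_eq, hm, ih0]
            · by_cases ht : pvTrailing name (pvBody (PySem.Str.strip l)) = ""
              · simp [hc', he, hb', pvMatch_eq, hm, ht, ih1]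
              · simp [hc', he, hb', pvMatch_eq, hm, ht]
          · have hb' := hb; simp at hb'
            simp [hc', he, hb', ih0]
    · intro t
      rw [pvLoopA_cons, pvScan_cons, pvLoopB_cons]
      simp only [Bool.true_and]
      by_cases he : PySem.Str.strip l = ""
      · simp [he, pvCharsEmptyDash, pvCharsEmptyHash, ih1]
      · by_cases hc : PySem.Str.startswith (PySem.Str.strip l) "#" = true
        · have hb := pvHashNotDash _ hc
          have hc' := hc; have hb' := hb
          simp at hc' hb'
          simp [hc', he, hb', ih0]
        · have hc' := hc; simp at hc'
          by_cases hb : PySem.Str.startswith (PySem.Str.strip l) "- " = true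
          · have hb' := hb; simp at hb'
            rcases hm : pvMatchB pvTargets (pvBody (PySem.Str.strip l)) with _ | name
            · by_cases hle : pvLeadingWs l ≤ t
              · simp [hc', he, hb', pvMatch_eq, hm, hle, ih0]
              · have hlt : t < pvLeadingWs l := by omega
                simp [hc', he, hb', pvMatch_eq, hm, hle, hlt]
            · by_cases ht : pvTrailing name (pvBody (PySem.Str.strip l)) = ""
              · simp [hc', he, hb', pvMatch_eq, hm, ht, ih1]
              · simp [hc', he, hb', pvMatch_eq, hm, ht]
          · have hb' := hb; simp at hb'
            by_cases hlt : t < pvLeadingWs l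
            · simp [hc', he, hb', hlt]
            · simp [hc', he, hb', hlt, ih1]

-- ===== VERDICT (by name: the statement is the Claim_ definition above) =====
theorem handoff_target_sections_have_any_content_py_spec : Claim_equal_handoff_target_sections_have_any_content_py := by
  intro content _
  unfold Spec_handoff_target_sections_have_any_content_py handoff_target_sections_have_any_content_py handoff_target_sections_have_any_content_py_alt
  exact (pvLoop_key (PySem.Str.splitlines content)).1 (-1)
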